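-- pv_equiv track=rewrite | github.com/AstosM/Know-your-Gender | app.py | extract_name_from_sentence
-- ===== SOURCE A (Python) =====
-- def extract_name_from_sentence(text: str) -> str:
--     """(Old behavior) Naive extraction: return last capitalized word, else last word."""
--     if not text.strip():
--         return ""
--     tokens = text.strip().split()
--     caps = [t for t in tokens if t[0].isalpha() and t[0].isupper()]
--     if caps:
--         return caps[-1]
--     return tokens[-1]
-- ===== SOURCE B (Python) =====
-- def extract_name_from_sentence(text: str) -> str:
--     """Single character-level pass over the text: no strip(), no split(), no caps list."""
--     last_word = ""
--     last_cap = ""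
--     cur = ""
--     for ch in text:
--         if ch.isspace():
--             if cur:
--                 last_word = cur
--                 if cur[0].isalpha() and cur[0].isupper():
--                     last_cap = cur
--                 cur = ""
--         else:
--             cur = cur + ch
--     if cur:
--         last_word = cur
--         if cur[0].isalpha() and cur[0].isupper():
--             last_cap = cur
--     return last_cap if last_cap else last_word
-- ===== Notes on version B (the rewrite author's own statement) =====
-- stated objective: alternative
-- what changed: B replaces strip+split+caps-list filtering with a single character-level pass over the raw text that maintains the current word, the last word seen and the last capitalized word seen.
import Mathlib
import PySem

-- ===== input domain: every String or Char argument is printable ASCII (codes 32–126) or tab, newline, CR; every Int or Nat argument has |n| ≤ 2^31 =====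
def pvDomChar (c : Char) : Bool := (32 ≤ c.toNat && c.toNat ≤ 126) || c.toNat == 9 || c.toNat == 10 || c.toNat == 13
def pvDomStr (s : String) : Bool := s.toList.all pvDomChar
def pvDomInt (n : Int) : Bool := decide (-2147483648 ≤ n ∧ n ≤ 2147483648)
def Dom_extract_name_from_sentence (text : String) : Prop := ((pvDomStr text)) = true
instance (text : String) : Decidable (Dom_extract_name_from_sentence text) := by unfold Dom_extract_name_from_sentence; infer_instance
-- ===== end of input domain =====

-- B replaces strip+split+filter with one character-level pass keeping the last word,
-- the last capitalized word and the current word (objective: alternative decomposition).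

-- ===== PORT A =====
-- t[0].isalpha() and t[0].isupper() (tokens from split() are nonempty, so t[0] never raises)
def pvIsCap (t : String) : Bool :=
  match PySem.Str.pyGet? t 0 with
  | some c => PySem.Chars.isalpha c && PySem.Chars.isupper c
  | none => false

def extract_name_from_sentence (text : String) : String :=
  if PySem.Str.strip text = "" then ""
  else
    let tokens := PySem.Str.split₀ (PySem.Str.strip text)
    let caps := tokens.filter pvIsCap
    match PySem.List.pyGet? caps (-1) with      -- caps[-1] when caps is nonempty
    | some x => x
    | none => (PySem.List.pyGet? tokens (-1)).getD ""   -- tokens[-1]; tokens ≠ [] here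

-- ===== PORT B =====
-- cur[0].isalpha() and cur[0].isupper() on a word held as List Char
def pvCapChars (w : List Char) : Bool :=
  match w with
  | [] => false
  | c :: _ => PySem.Chars.isalpha c && PySem.Chars.isupper c

-- the 'if cur: last_word = cur; if …: last_cap = cur' block of Source B
def pvFlush (lw lc cur : List Char) : List Char × List Char :=
  if cur = [] then (lw, lc)
  else (cur, if pvCapChars cur then cur else lc)

-- the 'for ch in text' loop of Source B
def pvScan (s : List Char) (lw lc cur : List Char) : List Char × List Char × List Char :=
  match s with
  | [] => (lw, lc, cur)
  | c :: rest =>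
    if PySem.Chars.isspace c then
      let p := pvFlush lw lc cur
      pvScan rest p.1 p.2 []
    else
      pvScan rest lw lc (cur ++ [c])

def extract_name_from_sentence_alt (text : String) : String :=
  let r := pvScan text.toList [] [] []
  let p := pvFlush r.1 r.2.1 r.2.2
  if p.2 = [] then String.ofList p.1 else String.ofList p.2    -- last_cap if last_cap else last_word

-- ===== PRECONDITION & SPEC =====
def Spec_extract_name_from_sentence (text : String) (out : String) : Prop := out = extract_name_from_sentence_alt text
instance (text : String) (out : String) : Decidable (Spec_extract_name_from_sentence text out) := by unfold Spec_extract_name_from_sentence; infer_instance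

-- ===== CLAIM (what is proved, stated in full; the proofs are below) =====
def Claim_equal_extract_name_from_sentence : Prop := ∀ (text : String), Dom_extract_name_from_sentence text → Spec_extract_name_from_sentence text (extract_name_from_sentence text)

-- ===== LEMMAS AND PROOFS =====

-- recording one finished token t into (last_word, last_cap)
def pvTok (p : List Char × List Char) (t : List Char) : List Char × List Char :=
  (t, if pvCapChars t then t else p.2)

theorem pv_go_acc (s : List Char) (cur : List Char) (acc : List (List Char)) :
    PySem.Chars.split₀.go s cur acc = acc.reverse ++ PySem.Chars.split₀.go s cur [] := by
  induction s generalizing cur acc with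
  | nil =>
    simp only [PySem.Chars.split₀.go]
    by_cases h : cur.isEmpty <;> simp [h]
  | cons c rest ih =>
    by_cases hs : PySem.Chars.isspace c
    · by_cases hc : cur.isEmpty
      · rw [PySem.Chars.split₀.go, PySem.Chars.split₀.go]
        simp only [hs, hc, if_true]
        exact ih [] acc
      · rw [PySem.Chars.split₀.go, PySem.Chars.split₀.go]
        simp only [hs, hc, if_true, Bool.false_eq_true, if_false]
        rw [ih [] (cur.reverse :: acc), ih [] [cur.reverse]]
        simp
    · rw [PySem.Chars.split₀.go, PySem.Chars.split₀.go]
      simp only [hs, Bool.false_eq_true, if_false]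
      exact ih _ _

theorem pv_scan_key (s : List Char) (lw lc cur : List Char) :
    (let r := pvScan s lw lc cur; pvFlush r.1 r.2.1 r.2.2)
    = (PySem.Chars.split₀.go s cur.reverse []).foldl pvTok (lw, lc) := by
  induction s generalizing lw lc cur with
  | nil =>
    simp only [pvScan]
    rw [PySem.Chars.split₀.go]
    by_cases h : cur = []
    · simp [h, pvFlush]
    · simp [h, List.isEmpty_iff, pvFlush, pvTok]
  | cons c rest ih =>
    by_cases hs : PySem.Chars.isspace c
    · rw [PySem.Chars.split₀.go]
      by_cases h : cur = []
      · simp only [pvScan, hs, h]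
        simpa [pvFlush, h] using ih lw lc []
      · have hne : cur.reverse.isEmpty = false := by simp [h]
        simp only [pvScan, hs, if_true, hne, Bool.false_eq_true, if_false, List.reverse_reverse]
        rw [pv_go_acc rest [] [cur], List.reverse_singleton]
        simp only [List.foldl_append, List.foldl_cons, List.foldl_nil]
        have hft : pvFlush lw lc cur = pvTok (lw, lc) cur := by simp [pvFlush, pvTok, h]
        rw [hft]
        simpa using ih (pvTok (lw, lc) cur).1 (pvTok (lw, lc) cur).2 []
    · rw [PySem.Chars.split₀.go]
      simp only [pvScan, hs, Bool.false_eq_true, if_false]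
      have hrev : (cur ++ [c]).reverse = c :: cur.reverse := by simp
      rw [← hrev]
      exact ih lw lc (cur ++ [c])

theorem pv_tokfold (toks : List (List Char)) (lw lc : List Char) :
    toks.foldl pvTok (lw, lc)
    = (toks.getLast?.getD lw, (toks.filter pvCapChars).getLast?.getD lc) := by
  induction toks generalizing lw lc with
  | nil => rfl
  | cons t rest ih =>
    rw [List.foldl_cons, pvTok, ih]
    by_cases h : pvCapChars t <;> simp [h, List.getLast?_cons]

theorem pv_go_allspace (w : List Char) (cur : List Char) (acc : List (List Char))
    (hw : ∀ c ∈ w, PySem.Chars.isspace c = true) :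
    PySem.Chars.split₀.go w cur acc = PySem.Chars.split₀.go [] cur acc := by
  induction w generalizing cur acc with
  | nil => rfl
  | cons c rest ih =>
    have hc := hw c (by simp)
    conv_lhs => rw [PySem.Chars.split₀.go]
    rw [show PySem.Chars.split₀.go [] cur acc
        = if cur.isEmpty = true then acc.reverse else (cur.reverse :: acc).reverse from rfl]
    by_cases h : cur.isEmpty
    · simp only [hc, if_true, h]
      rw [ih _ _ (fun c hc => hw c (by simp [hc]))]
      rfl
    · simp only [hc, if_true, h, Bool.false_eq_true, if_false]
      rw [ih _ _ (fun c hc => hw c (by simp [hc]))]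
      rfl

theorem pv_go_rstrip (s w : List Char) (cur : List Char) (acc : List (List Char))
    (hw : ∀ c ∈ w, PySem.Chars.isspace c = true) :
    PySem.Chars.split₀.go (s ++ w) cur acc = PySem.Chars.split₀.go s cur acc := by
  induction s generalizing cur acc with
  | nil =>
    simpa using pv_go_allspace w cur acc hw
  | cons c rest ih =>
    rw [List.cons_append, PySem.Chars.split₀.go, PySem.Chars.split₀.go]
    by_cases hs : PySem.Chars.isspace c <;> by_cases h : cur.isEmpty <;>
      simp [hs, h, ih]

theorem pv_go_lstrip (s : List Char) (acc : List (List Char)) :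
    PySem.Chars.split₀.go (List.dropWhile PySem.Chars.isspace s) [] acc
    = PySem.Chars.split₀.go s [] acc := by
  induction s generalizing acc with
  | nil => rfl
  | cons c rest ih =>
    by_cases hs : PySem.Chars.isspace c
    · rw [List.dropWhile_cons_of_pos (by simpa using hs), ih]
      rw [PySem.Chars.split₀.go]
      simp [hs]
    · rw [List.dropWhile_cons_of_neg (by simpa using hs)]

theorem pv_split₀_strip (cs : List Char) :
    PySem.Chars.split₀ (PySem.Chars.strip cs) = PySem.Chars.split₀ cs := by
  unfold PySem.Chars.split₀ PySem.Chars.strip PySem.Chars.lstrip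
  rw [pv_go_lstrip cs [] |>.symm]
  set u := List.dropWhile PySem.Chars.isspace cs with hu
  have hw : ∀ c ∈ (List.takeWhile PySem.Chars.isspace u.reverse).reverse,
      PySem.Chars.isspace c = true := by
    intro c hc
    rw [List.mem_reverse] at hc
    exact List.mem_takeWhile_imp hc
  have hdecomp : u = PySem.Chars.rstrip u ++ (List.takeWhile PySem.Chars.isspace u.reverse).reverse := by
    unfold PySem.Chars.rstrip
    rw [← List.reverse_append, List.takeWhile_append_dropWhile, List.reverse_reverse]
  conv_rhs => rw [hdecomp]
  rw [pv_go_rstrip _ _ [] [] hw]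

theorem pv_isCap_ofList (w : List Char) : pvIsCap (String.ofList w) = pvCapChars w := by
  cases w <;>
    simp [pvIsCap, pvCapChars, PySem.Str.pyGet?_eq, PySem.Chars.pyGet?_eq_listPyGet?,
      PySem.List.pyGet?, PySem.List.pyIdx?]

theorem pv_cap_ne_nil {w : List Char} (h : pvCapChars w = true) : w ≠ [] := by
  cases w <;> simp_all [pvCapChars]

theorem pv_tokens_eq (s : String) :
    PySem.Str.split₀ s = (PySem.Chars.split₀ s.toList).map String.ofList := by
  rw [← PySem.Str.split₀_map_toList, List.map_map]
  simp [Function.comp_def]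

theorem extract_name_from_sentence_spec : Claim_equal_extract_name_from_sentence := by
  intro text _
  unfold Spec_extract_name_from_sentence extract_name_from_sentence extract_name_from_sentence_alt
  have hkey := pv_scan_key text.toList [] [] []
  have hgo : PySem.Chars.split₀.go text.toList [] [] = PySem.Chars.split₀ text.toList := rfl
  rw [List.reverse_nil, hgo] at hkey
  set toks := PySem.Chars.split₀ text.toList with htoks
  rw [pv_tokfold] at hkey
  simp only at hkey ⊢
  rw [hkey]
  by_cases h : PySem.Str.strip text = ""
  · have hnil : PySem.Chars.strip text.toList = [] := by
      rw [← PySem.Str.toList_strip]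
      exact String.toList_eq_nil_iff.mpr h
    have : toks = [] := by
      rw [htoks, ← pv_split₀_strip, hnil]
      rfl
    simp [h, this]
  · simp only [h, if_false]
    rw [pv_tokens_eq, PySem.Str.toList_strip, pv_split₀_strip, ← htoks]
    rw [List.filter_map]
    have hcomp : (pvIsCap ∘ String.ofList) = pvCapChars := by
      funext w; exact pv_isCap_ofList w
    rw [hcomp, PySem.List.pyGet?_neg_one, List.getLast?_map]
    cases hc : (toks.filter pvCapChars).getLast? with
    | some w =>
      have hwcap : pvCapChars w = true := by
        have := List.mem_filter.mp (List.mem_of_getLast? hc)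
        exact this.2
      have hne : w ≠ [] := pv_cap_ne_nil hwcap
      simp [hc, hne]
    | none =>
      rw [PySem.List.pyGet?_neg_one, List.getLast?_map]
      cases ht : toks.getLast? with
      | some t => simp [ht]
      | none => simp [hc]
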